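-- pv_equiv track=rewrite | github.com/Hackfmi/HackFMI-8 | order.py | to_groups
-- ===== SOURCE A (Python) =====
-- from functools import reduce
--
-- def to_groups(seq, group_sizes):
--     groups = {}
--     seq_index = 0
--     group_index = 1
--
--     total_sizes = reduce(lambda x, y: x + y, group_sizes)
--
--     if total_sizes < len(seq):
--         group_sizes.append(len(seq) - total_sizes)
--
--     for size in group_sizes:
--         elements_taken = 0
--         group_name = "Group {}".format(group_index)
--         groups[group_name] = []
--         while elements_taken < size and seq_index < len(seq):
--             groups[group_name].append(seq[seq_index])
--             seq_index += 1
--             elements_taken += 1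
--         group_index += 1
--
--     return groups
-- ===== SOURCE B (Python) =====
-- def to_groups(seq, group_sizes):
--     total = sum(group_sizes)
--     if total < len(seq):
--         group_sizes.append(len(seq) - total)
--     groups = {}
--     offset = 0
--     for i, size in enumerate(group_sizes, 1):
--         chunk = seq[offset:offset + max(size, 0)]
--         offset += len(chunk)
--         groups["Group {}".format(i)] = chunk
--     return groups
-- ===== Notes on version B (the rewrite author's own statement) =====
-- stated objective: simpler
-- what changed: Replaces the element-by-element inner while loop with seq_index/elements_taken counters by a single offset and one slice per group (enumerate gives the 1-based group names), removing the nested loop and the per-element dict appends.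
import Mathlib
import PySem

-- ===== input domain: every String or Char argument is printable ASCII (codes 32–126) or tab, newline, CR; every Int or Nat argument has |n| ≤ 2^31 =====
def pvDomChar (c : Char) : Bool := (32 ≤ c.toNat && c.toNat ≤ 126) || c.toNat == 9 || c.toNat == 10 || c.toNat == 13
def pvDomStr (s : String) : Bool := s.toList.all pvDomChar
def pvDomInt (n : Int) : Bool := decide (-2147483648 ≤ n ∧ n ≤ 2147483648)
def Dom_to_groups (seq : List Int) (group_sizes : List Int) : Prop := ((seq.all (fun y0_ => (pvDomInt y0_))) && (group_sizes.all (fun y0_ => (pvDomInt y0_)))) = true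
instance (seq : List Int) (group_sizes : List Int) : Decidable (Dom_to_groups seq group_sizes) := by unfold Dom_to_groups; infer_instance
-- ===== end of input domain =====

-- B replaces A's nested per-element while loop (seq_index/elements_taken counters, per-element
-- dict appends) by one slice per group driven by a single offset, with enumerate for the names.
-- Note: both A and B append the remainder size to group_sizes IN PLACE (same observable mutation).

-- ===== PORT A =====
-- inner 'while elements_taken < size and seq_index < len(seq)' loop: returns the collected
-- elements and the final seq_index
def toGroupsInnerA (seq : List Int) (size : Int) (elementsTaken : Int) (seqIndex : Nat) :
    List Int × Nat :=
  if h : elementsTaken < size ∧ seqIndex < seq.length then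
    let r := toGroupsInnerA seq size (elementsTaken + 1) (seqIndex + 1)
    (seq[seqIndex]'h.2 :: r.1, r.2)
  else ([], seqIndex)
termination_by seq.length - seqIndex

-- 'for size in group_sizes' loop; the dict keys "Group 1", "Group 2", … are pairwise distinct
-- and inserted once each, so the dict is exactly this association list in insertion order
def toGroupsOuterA (seq : List Int) : List Int → Nat → Int → List (String × List Int)
  | [], _, _ => []
  | size :: rest, seqIndex, groupIndex =>
    let r := toGroupsInnerA seq size 0 seqIndex
    ("Group " ++ PySem.Int.toStr groupIndex, r.1) ::
      toGroupsOuterA seq rest r.2 (groupIndex + 1)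

def to_groups (seq : List Int) (group_sizes : List Int) : List (String × List Int) :=
  match group_sizes with
  | [] => []  -- reduce over an empty list raises TypeError; excluded by Pre_to_groups
  | g :: rest =>
    let total_sizes := rest.foldl (· + ·) g  -- reduce(lambda x, y: x + y, group_sizes)
    let gs := if total_sizes < (seq.length : Int)
              then (g :: rest) ++ [(seq.length : Int) - total_sizes]
              else g :: rest
    toGroupsOuterA seq gs 0 1

-- ===== PORT B =====
def toGroupsLoopB (seq : List Int) : List (Int × Int) → Int → List (String × List Int)
  | [], _ => []
  | (i, size) :: rest, offset =>
    let chunk := PySem.List.slice seq (some offset) (some (offset + max size 0))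
    ("Group " ++ PySem.Int.toStr i, chunk) ::
      toGroupsLoopB seq rest (offset + (chunk.length : Int))

def to_groups_alt (seq : List Int) (group_sizes : List Int) : List (String × List Int) :=
  let total := group_sizes.sum
  let gs := if total < (seq.length : Int)
            then group_sizes ++ [(seq.length : Int) - total]
            else group_sizes
  toGroupsLoopB seq (PySem.List.enumerate gs 1) 0

-- ===== PRECONDITION & SPEC =====
-- Pre_ excludes only empty group_sizes, on which A's reduce raises TypeError.
def Pre_to_groups (seq : List Int) (group_sizes : List Int) : Prop := group_sizes ≠ []
instance (seq : List Int) (group_sizes : List Int) : Decidable (Pre_to_groups seq group_sizes) := by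
  unfold Pre_to_groups; infer_instance

def pvWitness_to_groups : List Int × List Int := ([1, 2, 3, 4, 5], [2, 1])

def Spec_to_groups (seq : List Int) (group_sizes : List Int) (out : List (String × List Int)) : Prop :=
  out = to_groups_alt seq group_sizes
instance (seq : List Int) (group_sizes : List Int) (out : List (String × List Int)) :
    Decidable (Spec_to_groups seq group_sizes out) := by unfold Spec_to_groups; infer_instance

-- ===== CLAIM (what is proved, stated in full; the proofs are below) =====
def Claim_equal_to_groups : Prop := ∀ (seq : List Int) (group_sizes : List Int), Dom_to_groups seq group_sizes → Pre_to_groups seq group_sizes → Spec_to_groups seq group_sizes (to_groups seq group_sizes)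

-- ===== LEMMAS AND PROOFS =====

-- A's inner while loop collects (size - elements_taken) elements (clamped) from position seqIndex
lemma innerA_eq (seq : List Int) (size : Int) :
    ∀ (idx : Nat) (t : Int),
      toGroupsInnerA seq size t idx =
        ((seq.drop idx).take (size - t).toNat,
          idx + ((seq.drop idx).take (size - t).toNat).length) := by
  intro idx
  induction hn : seq.length - idx using Nat.strong_induction_on generalizing idx with
  | _ n ih =>
    intro t
    rw [toGroupsInnerA]
    split
    · rename_i h
      have hd : seq.drop idx = seq[idx] :: seq.drop (idx + 1) :=
        List.drop_eq_getElem_cons h.2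
      have ht : (size - t).toNat = (size - (t + 1)).toNat + 1 := by omega
      have := ih (seq.length - (idx + 1)) (by omega) (idx + 1) rfl (t + 1)
      simp only [this, hd, ht, List.take_succ_cons, List.length_cons]
      rw [Prod.mk.injEq]; exact ⟨rfl, by omega⟩
    · rename_i h
      rcases not_and_or.mp h with h1 | h2
      · have : (size - t).toNat = 0 := by omega
        simp [this]
      · have : seq.drop idx = [] := List.drop_eq_nil_of_le (by omega)
        simp [this]

-- the two loops produce the same list
lemma loops_eq (seq : List Int) :
    ∀ (gs : List Int) (idx : Nat) (gi : Int),
      toGroupsOuterA seq gs idx gi =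
        toGroupsLoopB seq (PySem.List.enumerate gs gi) (idx : Int) := by
  intro gs
  induction gs with
  | nil => intro idx gi; simp [toGroupsOuterA, PySem.List.enumerate_nil, toGroupsLoopB]
  | cons size rest ih =>
    intro idx gi
    rw [PySem.List.enumerate_cons]
    show _ = toGroupsLoopB seq ((gi, size) :: PySem.List.enumerate rest (gi + 1)) idx
    rw [toGroupsOuterA, toGroupsLoopB]
    have hchunk : PySem.List.slice seq (some (idx : Int)) (some ((idx : Int) + max size 0)) =
        (seq.drop idx).take (size - 0).toNat := by
      rw [PySem.List.slice_toNat _ (by positivity) (by positivity)]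
      simp only [Int.toNat_natCast]
      congr 1
      omega
    simp only [innerA_eq, ← hchunk]
    congr 1
    have : ((idx : Int) + ((PySem.List.slice seq (some (idx:Int)) (some ((idx:Int) + max size 0))).length : Int)) = (((idx + ((PySem.List.slice seq (some (idx:Int)) (some ((idx:Int) + max size 0))).length) : Nat) : Int)) := by push_cast; ring
    rw [this, ih]

-- ===== VERDICT (by name: the statement is the Claim_ definition above) =====
theorem to_groups_spec : Claim_equal_to_groups := by
  intro seq gs _ hpre
  unfold Spec_to_groups
  match gs with
  | [] => exact absurd rfl hpre
  | g :: rest =>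
    show to_groups seq (g :: rest) = to_groups_alt seq (g :: rest)
    simp only [to_groups, to_groups_alt]
    rw [show rest.foldl (· + ·) g = (g :: rest).sum from by
      rw [List.sum_eq_foldl, List.foldl_cons, zero_add]]
    exact_mod_cast loops_eq seq
      (if (g :: rest).sum < (seq.length : Int)
       then (g :: rest) ++ [(seq.length : Int) - (g :: rest).sum] else g :: rest) 0 1
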